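-- pv_equiv track=rewrite | github.com/jahmario/KrakenBot | hmmV3.py | interpret_aspects_to_signal
-- ===== SOURCE A (Python) =====
-- def interpret_aspects_to_signal(aspects):
--     volatility_signal = "Neutral"
--     for aspect, angle in aspects.items():
--         if angle <= 10 or angle >= 350:  # conjunction
--             volatility_signal = "High"
--             break
--         elif 80 <= angle <= 100 or 260 <= angle <= 280:  # square
--             volatility_signal = "Moderate"
--         elif 115 <= angle <= 125 or 235 <= angle <= 245:  # trine
--             volatility_signal = "Smooth"
--     return volatility_signal
-- ===== SOURCE B (Python) =====
-- def interpret_aspects_to_signal(aspects):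
--     vals = list(aspects.values())
--     if any(a <= 10 or a >= 350 for a in vals):
--         return "High"
--     for a in reversed(vals):
--         if 80 <= a <= 100 or 260 <= a <= 280:
--             return "Moderate"
--         if 115 <= a <= 125 or 235 <= a <= 245:
--             return "Smooth"
--     return "Neutral"
-- ===== Notes on version B (the rewrite author's own statement) =====
-- stated objective: alternative
-- what changed: Replaces the single stateful overwrite loop with two stateless scans: an any() pass that returns High on any conjunction (A's break makes High unconditional), then an early-return scan of the values in reverse which reproduces A's last-match-wins choice between Moderate and Smooth.
import Mathlib
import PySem

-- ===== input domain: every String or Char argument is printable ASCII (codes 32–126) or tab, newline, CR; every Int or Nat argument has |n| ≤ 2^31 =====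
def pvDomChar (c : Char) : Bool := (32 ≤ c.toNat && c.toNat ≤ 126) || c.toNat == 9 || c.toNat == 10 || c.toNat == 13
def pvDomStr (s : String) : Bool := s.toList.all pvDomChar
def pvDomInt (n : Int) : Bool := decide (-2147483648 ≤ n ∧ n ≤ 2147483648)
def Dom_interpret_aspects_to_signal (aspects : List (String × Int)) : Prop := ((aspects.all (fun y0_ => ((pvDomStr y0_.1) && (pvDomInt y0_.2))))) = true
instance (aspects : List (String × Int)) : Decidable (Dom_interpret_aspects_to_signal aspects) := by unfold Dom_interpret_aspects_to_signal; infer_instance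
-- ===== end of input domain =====

-- B replaces A's stateful overwrite loop by two stateless scans (any-conjunction check, then a reversed first-match scan); same cost, plainer decomposition.


-- ===== PORT A =====
-- A's loop: mutable volatility_signal, overwritten by each matching aspect, break on conjunction.
def pvLoopA : List (String × Int) → String → String
  | [], s => s
  | (_, a) :: t, s =>
    if a ≤ 10 ∨ 350 ≤ a then "High"
    else if (80 ≤ a ∧ a ≤ 100) ∨ (260 ≤ a ∧ a ≤ 280) then pvLoopA t "Moderate"
    else if (115 ≤ a ∧ a ≤ 125) ∨ (235 ≤ a ∧ a ≤ 245) then pvLoopA t "Smooth"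
    else pvLoopA t s

def interpret_aspects_to_signal (aspects : List (String × Int)) : String :=
  pvLoopA aspects "Neutral"

-- ===== PORT B =====
def pvIsConj (a : Int) : Bool := a ≤ 10 || 350 ≤ a
def pvIsSquare (a : Int) : Bool := (80 ≤ a && a ≤ 100) || (260 ≤ a && a ≤ 280)
def pvIsTrine (a : Int) : Bool := (115 ≤ a && a ≤ 125) || (235 ≤ a && a ≤ 245)

def interpret_aspects_to_signal_alt (aspects : List (String × Int)) : String :=
  if aspects.any (fun p => pvIsConj p.2) then "High"
  else
    match aspects.reverse.find? (fun p => pvIsSquare p.2 || pvIsTrine p.2) with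
    | some p => if pvIsSquare p.2 then "Moderate" else "Smooth"
    | none => "Neutral"

-- ===== PRECONDITION & SPEC =====
def Spec_interpret_aspects_to_signal (aspects : List (String × Int)) (out : String) : Prop := out = interpret_aspects_to_signal_alt aspects
instance (aspects : List (String × Int)) (out : String) : Decidable (Spec_interpret_aspects_to_signal aspects out) := by unfold Spec_interpret_aspects_to_signal; infer_instance

-- ===== CLAIM (what is proved, stated in full; the proofs are below) =====
def Claim_equal_interpret_aspects_to_signal : Prop := ∀ (aspects : List (String × Int)), Dom_interpret_aspects_to_signal aspects → Spec_interpret_aspects_to_signal aspects (interpret_aspects_to_signal aspects)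

-- ===== LEMMAS AND PROOFS =====
theorem pvLoopA_eq (l : List (String × Int)) : ∀ (s : String),
    pvLoopA l s =
      if l.any (fun p => pvIsConj p.2) then "High"
      else
        match l.reverse.find? (fun p => pvIsSquare p.2 || pvIsTrine p.2) with
        | some p => if pvIsSquare p.2 then "Moderate" else "Smooth"
        | none => s := by
  induction l with
  | nil => intro s; simp [pvLoopA]
  | cons hd t ih =>
    intro s
    obtain ⟨k, a⟩ := hd
    by_cases hc : a ≤ 10 ∨ 350 ≤ a
    · have hcb : pvIsConj a = true := by simp [pvIsConj]; omega
      simp [pvLoopA, hc, hcb]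
    · have hcb : pvIsConj a = false := by simp [pvIsConj]; omega
      have hrev : ((k, a) :: t).reverse = t.reverse ++ [(k, a)] := by simp
      by_cases hs : (80 ≤ a ∧ a ≤ 100) ∨ (260 ≤ a ∧ a ≤ 280)
      · have hsb : pvIsSquare a = true := by simp [pvIsSquare]; omega
        simp only [pvLoopA, if_neg hc, if_pos hs, ih, List.any_cons, hcb, Bool.false_or,
          hrev, List.find?_append]
        cases t.reverse.find? (fun p => pvIsSquare p.2 || pvIsTrine p.2) <;>
          simp [List.find?, hsb]
      · have hsb : pvIsSquare a = false := by simp [pvIsSquare]; omega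
        by_cases ht : (115 ≤ a ∧ a ≤ 125) ∨ (235 ≤ a ∧ a ≤ 245)
        · have htb : pvIsTrine a = true := by simp [pvIsTrine]; omega
          simp only [pvLoopA, if_neg hc, if_neg hs, if_pos ht, ih, List.any_cons, hcb,
            Bool.false_or, hrev, List.find?_append]
          cases t.reverse.find? (fun p => pvIsSquare p.2 || pvIsTrine p.2) <;>
            simp [List.find?, hsb, htb]
        · have htb : pvIsTrine a = false := by simp [pvIsTrine]; omega
          simp only [pvLoopA, if_neg hc, if_neg hs, if_neg ht, ih, List.any_cons, hcb,
            Bool.false_or, hrev, List.find?_append]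
          cases t.reverse.find? (fun p => pvIsSquare p.2 || pvIsTrine p.2) <;>
            simp [List.find?, hsb, htb]

-- ===== VERDICT (by name: the statement is the Claim_ definition above) =====
theorem interpret_aspects_to_signal_spec : Claim_equal_interpret_aspects_to_signal := by
  intro aspects _
  unfold Spec_interpret_aspects_to_signal interpret_aspects_to_signal interpret_aspects_to_signal_alt
  rw [pvLoopA_eq]
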